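-- pv_equiv track=rewrite | github.com/iamnshrd/mentions | agents/mentions/modules/news_context/builder.py | _typed_news_buckets
-- ===== SOURCE A (Python) =====
-- def _typed_news_buckets(typed_rows: list[dict]) -> tuple[list[dict], list[dict], list[dict]]:
--     core_news = []
--     expansion_news = []
--     ambient_news = []
--     seen = set()
--     for row in typed_rows:
--         key = (row.get('headline', ''), row.get('family', ''))
--         if key in seen:
--             continue
--         seen.add(key)
--         evidence_type = row.get('evidence_type') or ''
--         if evidence_type == 'event_core':
--             core_news.append(row)
--         elif evidence_type == 'topic_expansion':
--             expansion_news.append(row)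
--         elif evidence_type == 'ambient_regime':
--             ambient_news.append(row)
--     return core_news[:5], expansion_news[:5], ambient_news[:5]
-- ===== SOURCE B (Python) =====
-- def _typed_news_buckets(typed_rows: list[dict]) -> tuple[list[dict], list[dict], list[dict]]:
--     # Pass 1: order-preserving dedup on (headline, family).
--     seen = set()
--     deduped = []
--     for row in typed_rows:
--         key = (row.get('headline', ''), row.get('family', ''))
--         if key not in seen:
--             seen.add(key)
--             deduped.append(row)
--     # Pass 2: three independent category scans, top 5 each.
--     core_news = [r for r in deduped if (r.get('evidence_type') or '') == 'event_core'][:5]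
--     expansion_news = [r for r in deduped if (r.get('evidence_type') or '') == 'topic_expansion'][:5]
--     ambient_news = [r for r in deduped if (r.get('evidence_type') or '') == 'ambient_regime'][:5]
--     return core_news, expansion_news, ambient_news
-- ===== Notes on version B (the rewrite author's own statement) =====
-- stated objective: alternative
-- what changed: A's single fused loop that dispatches each unseen row into one of three accumulators is split into an order-preserving dedup pass followed by three independent filter comprehensions (one per evidence type), each sliced to 5.
import Mathlib
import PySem

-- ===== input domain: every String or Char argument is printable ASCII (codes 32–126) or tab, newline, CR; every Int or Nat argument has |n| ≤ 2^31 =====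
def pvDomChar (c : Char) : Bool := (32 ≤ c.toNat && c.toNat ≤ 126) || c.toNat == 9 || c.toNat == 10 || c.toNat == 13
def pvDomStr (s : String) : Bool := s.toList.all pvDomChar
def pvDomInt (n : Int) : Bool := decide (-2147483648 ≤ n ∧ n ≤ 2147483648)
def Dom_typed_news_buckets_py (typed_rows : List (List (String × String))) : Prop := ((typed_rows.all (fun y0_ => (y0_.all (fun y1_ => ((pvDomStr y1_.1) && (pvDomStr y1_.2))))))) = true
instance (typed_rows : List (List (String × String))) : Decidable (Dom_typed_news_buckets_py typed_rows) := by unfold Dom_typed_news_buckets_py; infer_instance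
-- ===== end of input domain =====

-- B splits A's fused dispatch loop into a dedup pass plus three independent filter scans (objective: alternative decomposition).

-- shared primitive: row.get(k, '') / (row.get(k) or '') on str->str rows (exact; '' is falsy so `or ''` is getD with default '')
def rowGet (r : List (String × String)) (k : String) : String :=
  PySem.Dict.getD (PySem.Dict.mk r) k ""

-- ===== PORT A =====
-- the for-loop of A over (seen, core_news, expansion_news, ambient_news)
def loopA : List (List (String × String)) → PySem.Set (String × String) →
    List (List (String × String)) → List (List (String × String)) → List (List (String × String)) →
    (List (List (String × String))) × (List (List (String × String))) × (List (List (String × String)))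
  | [], _, core, expn, amb => (core.take 5, expn.take 5, amb.take 5)  -- return core[:5], expansion[:5], ambient[:5]
  | r :: rest, seen, core, expn, amb =>
    if PySem.Set.contains seen (rowGet r "headline", rowGet r "family") then
      loopA rest seen core expn amb
    else
      let seen' := PySem.Set.add seen (rowGet r "headline", rowGet r "family")
      if rowGet r "evidence_type" = "event_core" then loopA rest seen' (core ++ [r]) expn amb
      else if rowGet r "evidence_type" = "topic_expansion" then loopA rest seen' core (expn ++ [r]) amb
      else if rowGet r "evidence_type" = "ambient_regime" then loopA rest seen' core expn (amb ++ [r])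
      else loopA rest seen' core expn amb

def typed_news_buckets_py (typed_rows : List (List (String × String))) : (List (List (String × String))) × (List (List (String × String))) × (List (List (String × String))) :=
  loopA typed_rows PySem.Set.empty [] [] []

-- ===== PORT B =====
-- pass 1 of B: order-preserving dedup on (headline, family)
def dedupB : List (List (String × String)) → PySem.Set (String × String) → List (List (String × String))
  | [], _ => []
  | r :: rest, seen =>
    if PySem.Set.contains seen (rowGet r "headline", rowGet r "family") then
      dedupB rest seen
    else
      r :: dedupB rest (PySem.Set.add seen (rowGet r "headline", rowGet r "family"))

def typed_news_buckets_py_alt (typed_rows : List (List (String × String))) : (List (List (String × String))) × (List (List (String × String))) × (List (List (String × String))) :=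
  let deduped := dedupB typed_rows PySem.Set.empty
  ((deduped.filter (fun r => rowGet r "evidence_type" == "event_core")).take 5,
   (deduped.filter (fun r => rowGet r "evidence_type" == "topic_expansion")).take 5,
   (deduped.filter (fun r => rowGet r "evidence_type" == "ambient_regime")).take 5)

-- ===== PRECONDITION & SPEC =====
def Spec_typed_news_buckets_py (typed_rows : List (List (String × String))) (out : (List (List (String × String))) × (List (List (String × String))) × (List (List (String × String)))) : Prop := out = typed_news_buckets_py_alt typed_rows
instance (typed_rows : List (List (String × String))) (out : (List (List (String × String))) × (List (List (String × String))) × (List (List (String × String)))) : Decidable (Spec_typed_news_buckets_py typed_rows out) := by unfold Spec_typed_news_buckets_py; infer_instance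

-- ===== CLAIM (what is proved, stated in full; the proofs are below) =====
def Claim_equal_typed_news_buckets_py : Prop := ∀ (typed_rows : List (List (String × String))), Dom_typed_news_buckets_py typed_rows → Spec_typed_news_buckets_py typed_rows (typed_news_buckets_py typed_rows)

-- ===== LEMMAS AND PROOFS =====
-- loop invariant: A's fused loop is the accumulators followed by the filtered dedup of the remaining rows
theorem loopA_eq_filter_dedupB (rows : List (List (String × String))) :
    ∀ (seen : PySem.Set (String × String)) (core expn amb : List (List (String × String))),
    loopA rows seen core expn amb =
      ((core ++ (dedupB rows seen).filter (fun r => rowGet r "evidence_type" == "event_core")).take 5,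
       (expn ++ (dedupB rows seen).filter (fun r => rowGet r "evidence_type" == "topic_expansion")).take 5,
       (amb ++ (dedupB rows seen).filter (fun r => rowGet r "evidence_type" == "ambient_regime")).take 5) := by
  induction rows with
  | nil => intro seen core expn amb; simp [loopA, dedupB]
  | cons r rest ih =>
    intro seen core expn amb
    by_cases hk : (rowGet r "headline", rowGet r "family") ∈ seen
    · simp [loopA, dedupB, hk, ih]
    · by_cases h1 : rowGet r "evidence_type" = "event_core"
      · simp [loopA, dedupB, hk, h1, ih]
      · by_cases h2 : rowGet r "evidence_type" = "topic_expansion"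
        · simp [loopA, dedupB, hk, h2, ih]
        · by_cases h3 : rowGet r "evidence_type" = "ambient_regime"
          · simp [loopA, dedupB, hk, h3, ih]
          · simp [loopA, dedupB, hk, h1, h2, h3, ih]

-- ===== VERDICT (by name: the statement is the Claim_ definition above) =====
theorem typed_news_buckets_py_spec : Claim_equal_typed_news_buckets_py := by
  intro typed_rows _
  unfold Spec_typed_news_buckets_py typed_news_buckets_py typed_news_buckets_py_alt
  simp [loopA_eq_filter_dedupB]
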